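-- pv_equiv track=rewrite | github.com/yabincui/dwarf_parser | objdump_line_parser.py | isaddr
-- ===== SOURCE A (Python) =====
-- def isaddr(s):
--     num_len = 0
--     for c in s:
--         if not c.isalnum():
--             break
--         if (c >= '0' and c <= '9') or (c >= 'a' and c <= 'f') or (c >= 'A' and c <= 'F'):
--             num_len += 1
--         else:
--             return False
--     return num_len > 0
-- ===== SOURCE B (Python) =====
-- import string
--
--
-- def isaddr(s):
--     rest = s.lstrip(string.hexdigits)
--     return len(rest) < len(s) and not (rest and rest[0].isalnum())
-- ===== Notes on version B (the rewrite author's own statement) =====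
-- stated objective: faster
-- what changed: A's per-character Python loop (count hex chars, break on non-alnum, early-return on non-hex alnum) is replaced by stripping the leading hex run with str.lstrip(string.hexdigits) and inspecting only the single boundary character: nonempty run and (end of string or non-alnum boundary).
import Mathlib
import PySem

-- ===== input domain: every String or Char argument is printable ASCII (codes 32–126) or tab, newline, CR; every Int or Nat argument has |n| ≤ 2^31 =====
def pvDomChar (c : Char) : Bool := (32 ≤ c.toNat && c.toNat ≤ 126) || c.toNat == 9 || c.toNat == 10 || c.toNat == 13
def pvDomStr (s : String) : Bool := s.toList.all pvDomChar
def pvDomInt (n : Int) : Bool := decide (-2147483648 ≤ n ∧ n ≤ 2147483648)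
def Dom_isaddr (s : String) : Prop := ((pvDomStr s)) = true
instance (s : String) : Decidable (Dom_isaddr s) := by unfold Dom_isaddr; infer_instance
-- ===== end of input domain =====

-- B replaces A's per-character counting loop by lstrip(string.hexdigits) plus a single
-- boundary-character check (objective: faster — a timing run measured B faster; same O(n)).

-- ===== PORT A =====
-- A's hex-range test, literally: ('0'<=c<='9') or ('a'<=c<='f') or ('A'<=c<='F')
def isaddrHexA (c : Char) : Bool :=
  (decide ('0' ≤ c) && decide (c ≤ '9')) || (decide ('a' ≤ c) && decide (c ≤ 'f')) ||
    (decide ('A' ≤ c) && decide (c ≤ 'F'))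

-- A's for-loop with the num_len accumulator, break and early return False
def isaddrGo : List Char → Nat → Bool
  | [], n => decide (n > 0)
  | c :: rest, n =>
    if !(PySem.Chars.isalnum c) then decide (n > 0)     -- break
    else if isaddrHexA c then isaddrGo rest (n + 1)
    else false                                          -- return False

def isaddr (s : String) : Bool := isaddrGo s.toList 0

-- ===== PORT B =====
-- string.hexdigits
def isaddrHexdigits : List Char :=
  ['0','1','2','3','4','5','6','7','8','9','a','b','c','d','e','f','A','B','C','D','E','F']

-- Source B: rest = s.lstrip(string.hexdigits); return len(rest) < len(s) and not (rest and rest[0].isalnum())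
-- s.lstrip(chars) drops the maximal leading run of chars in the set: ported by hand as
-- dropWhile of set membership (exact). 'rest and rest[0].isalnum()' is the head check below.
def isaddr_alt (s : String) : Bool :=
  let rest := s.toList.dropWhile (fun c => isaddrHexdigits.contains c)
  decide (rest.length < s.toList.length) &&
    !(match rest with | [] => false | c :: _ => PySem.Chars.isalnum c)

-- ===== PRECONDITION & SPEC =====
def Spec_isaddr (s : String) (out : Bool) : Prop := out = isaddr_alt s
instance (s : String) (out : Bool) : Decidable (Spec_isaddr s out) := by unfold Spec_isaddr; infer_instance

-- ===== CLAIM (what is proved, stated in full; the proofs are below) =====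
def Claim_equal_isaddr : Prop := ∀ (s : String), Dom_isaddr s → Spec_isaddr s (isaddr s)

-- ===== LEMMAS AND PROOFS =====

-- A's three-range test is membership in string.hexdigits, for every Char
lemma isaddrHexA_eq_contains (c : Char) : isaddrHexA c = isaddrHexdigits.contains c := by
  have hle : ∀ a b : Char, (a ≤ b) = (a.toNat ≤ b.toNat) := by
    intro a b; simp [Char.le_def, UInt32.le_iff_toNat_le]
  have hne : ∀ (d : Char) (m : Nat), c ≠ d → d.toNat = m → c.toNat ≠ m := by
    intro d m hcd hdm he
    rw [← hdm] at he
    exact hcd (Char.ext (UInt32.toNat_inj.mp he))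
  by_cases hmem : c ∈ isaddrHexdigits
  · have hc : isaddrHexdigits.contains c = true := by simpa using hmem
    rw [hc]
    fin_cases hmem <;> decide
  · have hc : isaddrHexdigits.contains c = false := by simpa using hmem
    rw [hc]
    simp only [isaddrHexdigits, List.mem_cons, List.not_mem_nil, or_false] at hmem
    push_neg at hmem
    obtain ⟨h0,h1,h2,h3,h4,h5,h6,h7,h8,h9,h10,h11,h12,h13,h14,h15,h16,h17,h18,h19,h20,h21⟩ := hmem
    have nh0 := hne '0' 48 h0 rfl
    have nh1 := hne '1' 49 h1 rfl
    have nh2 := hne '2' 50 h2 rfl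
    have nh3 := hne '3' 51 h3 rfl
    have nh4 := hne '4' 52 h4 rfl
    have nh5 := hne '5' 53 h5 rfl
    have nh6 := hne '6' 54 h6 rfl
    have nh7 := hne '7' 55 h7 rfl
    have nh8 := hne '8' 56 h8 rfl
    have nh9 := hne '9' 57 h9 rfl
    have nh10 := hne 'a' 97 h10 rfl
    have nh11 := hne 'b' 98 h11 rfl
    have nh12 := hne 'c' 99 h12 rfl
    have nh13 := hne 'd' 100 h13 rfl
    have nh14 := hne 'e' 101 h14 rfl
    have nh15 := hne 'f' 102 h15 rfl
    have nh16 := hne 'A' 65 h16 rfl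
    have nh17 := hne 'B' 66 h17 rfl
    have nh18 := hne 'C' 67 h18 rfl
    have nh19 := hne 'D' 68 h19 rfl
    have nh20 := hne 'E' 69 h20 rfl
    have nh21 := hne 'F' 70 h21 rfl
    simp only [isaddrHexA, hle, Bool.or_eq_false_iff, Bool.and_eq_false_iff,
      decide_eq_false_iff_not, not_le]
    rw [show ('0':Char).toNat = 48 from rfl] at *
    rw [show ('9':Char).toNat = 57 from rfl] at *
    rw [show ('a':Char).toNat = 97 from rfl] at *
    rw [show ('f':Char).toNat = 102 from rfl] at *
    rw [show ('A':Char).toNat = 65 from rfl] at *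
    rw [show ('F':Char).toNat = 70 from rfl] at *
    omega

-- every hex digit is alphanumeric
lemma isaddrHex_isalnum (c : Char) (h : isaddrHexdigits.contains c = true) :
    PySem.Chars.isalnum c = true := by
  have hm : c ∈ isaddrHexdigits := by simpa using h
  fin_cases hm <;> decide

-- the boundary check B performs after the hex run
def isaddrBd (l : List Char) : Bool :=
  !(match l.dropWhile (fun c => isaddrHexdigits.contains c) with
    | [] => false
    | c :: _ => PySem.Chars.isalnum c)

-- invariant of A's loop: "counter positive or some hex char was dropped" and the boundary is ok
lemma isaddrGo_eq (l : List Char) (n : Nat) :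
    isaddrGo l n =
      (decide (0 < n ∨ (l.dropWhile (fun c => isaddrHexdigits.contains c)).length < l.length)
        && isaddrBd l) := by
  induction l generalizing n with
  | nil => simp [isaddrGo, isaddrBd]
  | cons c rest ih =>
    by_cases hx : isaddrHexdigits.contains c = true
    · have hal : PySem.Chars.isalnum c = true := isaddrHex_isalnum c hx
      have hdw : (c :: rest).dropWhile (fun c => isaddrHexdigits.contains c) =
          rest.dropWhile (fun c => isaddrHexdigits.contains c) :=
        List.dropWhile_cons_of_pos hx
      rw [isaddrGo]
      simp only [hal, Bool.not_true, isaddrHexA_eq_contains, hx, if_true]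
      rw [if_neg (by simp), ih]
      have hlen := List.length_dropWhile_le (p := fun c => isaddrHexdigits.contains c) (l := rest)
      unfold isaddrBd
      rw [hdw, List.length_cons]
      congr 1
      simp only [decide_eq_decide]
      omega
    · have hdw : (c :: rest).dropWhile (fun c => isaddrHexdigits.contains c) = c :: rest :=
        List.dropWhile_cons_of_neg hx
      have hxf : isaddrHexdigits.contains c = false := by simpa using hx
      by_cases hal : PySem.Chars.isalnum c = true
      · rw [isaddrGo]
        simp only [hal, Bool.not_true, isaddrHexA_eq_contains, hxf]
        rw [if_neg (by simp), if_neg (by simp)]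
        unfold isaddrBd
        rw [hdw]
        simp [hal]
      · have hal' : PySem.Chars.isalnum c = false := by simpa using hal
        rw [isaddrGo]
        simp only [hal', Bool.not_false, if_true]
        unfold isaddrBd
        rw [hdw, List.length_cons]
        have hm : (match c :: rest with | [] => false | c :: _ => PySem.Chars.isalnum c) = false :=
          hal'
        rw [hm]
        simp only [Bool.not_false, Bool.and_true, decide_eq_decide]
        omega

-- ===== VERDICT (by name: the statement is the Claim_ definition above) =====
theorem isaddr_spec : Claim_equal_isaddr := by
  intro s _
  unfold Spec_isaddr isaddr isaddr_alt
  rw [isaddrGo_eq]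
  unfold isaddrBd
  congr 1
  simp only [decide_eq_decide]
  omega
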